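-- pv_equiv track=rewrite | github.com/kriztovv/python3 | main (1).py | create_chessboard
-- ===== SOURCE A (Python) =====
-- def create_chessboard(n):
--     board = []
--     for i in range(n):
--         row = []
--         for j in range(n):
--             row.append((i + j) % 2)
--         board.append(row)
--     return board
-- ===== SOURCE B (Python) =====
-- def create_chessboard(n):
--     row = [j % 2 for j in range(n)]
--     board = []
--     for _ in range(n):
--         board.append(row)
--         row = [1 - x for x in row]
--     return board
-- ===== Notes on version B (the rewrite author's own statement) =====
-- stated objective: alternative
-- what changed: B builds only the first row from j % 2 and derives each subsequent row by complementing the previous one (a running recurrence between adjacent rows), instead of evaluating (i + j) % 2 for every cell in nested loops.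
import Mathlib
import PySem

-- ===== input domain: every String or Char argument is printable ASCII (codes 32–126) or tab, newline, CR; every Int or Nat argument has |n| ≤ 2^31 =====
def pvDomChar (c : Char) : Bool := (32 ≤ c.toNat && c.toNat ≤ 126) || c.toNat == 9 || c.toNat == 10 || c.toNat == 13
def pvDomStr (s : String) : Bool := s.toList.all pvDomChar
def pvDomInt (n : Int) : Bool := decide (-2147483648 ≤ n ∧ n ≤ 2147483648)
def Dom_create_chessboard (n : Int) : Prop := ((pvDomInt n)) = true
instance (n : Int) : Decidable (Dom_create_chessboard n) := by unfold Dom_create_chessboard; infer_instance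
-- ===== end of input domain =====

-- B builds row 0 once and derives each next row by complementing the previous one,
-- instead of A's per-cell (i+j) % 2 in nested loops; same cost, different decomposition.

-- ===== PORT A =====
def create_chessboard (n : Int) : List (List Int) :=
  (PySem.List.pyRange 0 n 1).foldl
    (fun board i =>
      board ++ [(PySem.List.pyRange 0 n 1).foldl
        (fun row j => row ++ [PySem.Int.mod (i + j) 2]) []])
    []

-- ===== PORT B =====
def create_chessboard_alt (n : Int) : List (List Int) :=
  let row0 := (PySem.List.pyRange 0 n 1).map (fun j => PySem.Int.mod j 2)
  ((PySem.List.pyRange 0 n 1).foldl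
    (fun (st : List (List Int) × List Int) _ =>
      (st.1 ++ [st.2], st.2.map (fun x => 1 - x)))
    ([], row0)).1

-- ===== PRECONDITION & SPEC =====
def Spec_create_chessboard (n : Int) (out : List (List Int)) : Prop := out = create_chessboard_alt n
instance (n : Int) (out : List (List Int)) : Decidable (Spec_create_chessboard n out) := by unfold Spec_create_chessboard; infer_instance

-- ===== CLAIM (what is proved, stated in full; the proofs are below) =====
def Claim_equal_create_chessboard : Prop := ∀ (n : Int), Dom_create_chessboard n → Spec_create_chessboard n (create_chessboard n)

-- ===== LEMMAS AND PROOFS =====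

-- the row of index i, as a function of i
def pvRow (n i : Int) : List Int :=
  (PySem.List.pyRange 0 n 1).map (fun j => PySem.Int.mod (i + j) 2)

theorem pvMod2_succ (x : Int) : 1 - PySem.Int.mod x 2 = PySem.Int.mod (x + 1) 2 := by
  simp only [PySem.Int.mod_eq_emod_of_pos (show (0:Int) < 2 by norm_num)]
  omega

theorem pvRow_compl (n i : Int) : (pvRow n i).map (fun x => 1 - x) = pvRow n (i + 1) := by
  simp only [pvRow, List.map_map]
  apply List.map_congr_left
  intro j _
  simp only [Function.comp_apply]
  rw [pvMod2_succ]
  ring_nf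

theorem pvA_inner (n i : Int) :
    (PySem.List.pyRange 0 n 1).foldl (fun row j => row ++ [PySem.Int.mod (i + j) 2]) [] = pvRow n i := by
  rw [PySem.List.foldl_append_singleton_eq_map]
  rfl

theorem pvA_eq (n : Int) :
    create_chessboard n = (PySem.List.pyRange 0 n 1).map (fun i => pvRow n i) := by
  unfold create_chessboard
  rw [PySem.List.foldl_append_singleton_eq_map]
  exact List.map_congr_left (fun i _ => pvA_inner n i)

-- B's loop: after consuming a list of length k starting from row index i,
-- the accumulated board is the rows i, i+1, …, i+k-1.
theorem pvB_loop (l : List Int) (n i : Int) (acc : List (List Int)) :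
    (l.foldl (fun (st : List (List Int) × List Int) _ =>
        (st.1 ++ [st.2], st.2.map (fun x => 1 - x))) (acc, pvRow n i)).1
      = acc ++ (List.range l.length).map (fun (k : Nat) => pvRow n (i + (k : Int))) := by
  induction l generalizing i acc with
  | nil => simp
  | cons a t ih =>
    simp only [List.foldl_cons]
    rw [pvRow_compl, ih]
    rw [List.length_cons, List.range_succ_eq_map, List.map_cons, List.map_map]
    simp only [List.append_assoc, List.singleton_append, Nat.cast_zero, add_zero]
    congr 2
    apply List.map_congr_left
    intro k _
    simp only [Function.comp_apply]
    congr 1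
    push_cast
    ring

theorem pvB_eq (n : Int) :
    create_chessboard_alt n = (List.range (PySem.List.pyRange 0 n 1).length).map (fun (k : Nat) => pvRow n (k : Int)) := by
  unfold create_chessboard_alt
  have h0 : (PySem.List.pyRange 0 n 1).map (fun j => PySem.Int.mod j 2) = pvRow n 0 := by
    unfold pvRow; simp
  simp only [h0]
  rw [pvB_loop (PySem.List.pyRange 0 n 1) n 0 []]
  simp

theorem pvRange_map (n : Int) (f : Int → List Int) :
    (PySem.List.pyRange 0 n 1).map f = (List.range (PySem.List.pyRange 0 n 1).length).map (fun (k : Nat) => f (k : Int)) := by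
  rw [PySem.List.pyRange_one]
  simp [List.map_map, Function.comp_def]

-- ===== VERDICT (by name: the statement is the Claim_ definition above) =====
theorem create_chessboard_spec : Claim_equal_create_chessboard := by
  intro n _
  show create_chessboard n = create_chessboard_alt n
  rw [pvA_eq, pvB_eq, pvRange_map]
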